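-- pv_equiv track=rewrite | github.com/rohitgiri28coding/python-programming-basics | Practice question 2.py | next_letter
-- ===== SOURCE A (Python) =====
-- def next_letter(word):
--     new_word = ''
--     vowel = 'a', 'e', 'i', 'o', 'u', 'A', 'E', 'I', 'O', 'U'
--     for letter in word:
--         if letter in vowel:
--             new_word += chr(ord(letter)+1)
--         else:
--             new_word += letter
--     return new_word
-- ===== SOURCE B (Python) =====
-- def next_letter(word):
--     # Staged global substitution: one replace pass per vowel.  Safe because no
--     # replacement output (b, f, j, p, v, B, F, J, P, V) is itself a vowel, so the
--     # ten passes cannot cascade.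
--     for v in 'aeiouAEIOU':
--         word = word.replace(v, chr(ord(v) + 1))
--     return word
-- ===== Notes on version B (the rewrite author's own statement) =====
-- stated objective: faster
-- what changed: Replaces A's single per-character Python loop (tuple membership test + string concatenation) by ten staged whole-string str.replace passes, one per vowel; correct because no replacement output is itself a vowel, so the passes cannot cascade.
import Mathlib
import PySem

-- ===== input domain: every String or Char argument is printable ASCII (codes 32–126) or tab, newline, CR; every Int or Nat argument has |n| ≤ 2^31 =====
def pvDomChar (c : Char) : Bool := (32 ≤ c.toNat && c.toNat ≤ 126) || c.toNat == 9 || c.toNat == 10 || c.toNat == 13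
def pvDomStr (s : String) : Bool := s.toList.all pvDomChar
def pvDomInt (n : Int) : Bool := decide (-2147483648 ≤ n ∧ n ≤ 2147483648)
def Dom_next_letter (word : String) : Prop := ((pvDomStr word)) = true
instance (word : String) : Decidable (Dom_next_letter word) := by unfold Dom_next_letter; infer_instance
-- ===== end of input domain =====

-- B replaces A's single per-character accumulator loop by ten staged whole-string
-- replace passes (one per vowel); correct because no replacement output is itself a vowel.

-- ===== PORT A =====
def pvVowels : List Char := ['a', 'e', 'i', 'o', 'u', 'A', 'E', 'I', 'O', 'U']

def next_letter (word : String) : String :=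
  String.ofList (word.toList.foldl
    (fun acc letter =>
      if letter ∈ pvVowels then acc ++ [Char.ofNat (letter.toNat + 1)]
      else acc ++ [letter]) [])

-- ===== PORT B =====
-- for v in 'aeiouAEIOU': word = word.replace(v, chr(ord(v) + 1)); return word
def next_letter_alt (word : String) : String :=
  "aeiouAEIOU".toList.foldl
    (fun w v => PySem.Str.replace w (String.ofList [v]) (String.ofList [Char.ofNat (v.toNat + 1)]))
    word

-- ===== PRECONDITION & SPEC =====
def Spec_next_letter (word : String) (out : String) : Prop := out = next_letter_alt word
instance (word : String) (out : String) : Decidable (Spec_next_letter word out) := by unfold Spec_next_letter; infer_instance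

-- ===== CLAIM (what is proved, stated in full; the proofs are below) =====
def Claim_equal_next_letter : Prop := ∀ (word : String), Dom_next_letter word → Spec_next_letter word (next_letter word)

-- ===== LEMMAS AND PROOFS =====

-- the single-vowel substitution function (proof-side name; keeps terms small)
def pvSub (v : Char) : Char → Char := fun c => if c = v then Char.ofNat (v.toNat + 1) else c

-- single-character str.replace is a character-wise map (fact about PySem.Chars.replace.go)
theorem pv_go_single (v w : Char) :
    ∀ (l : List Char) (fuel : Nat) (acc : List Char), l.length ≤ fuel →
    PySem.Chars.replace.go [v] [w] fuel l acc
      = acc.reverse ++ l.map (fun c => if c = v then w else c) := by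
  intro l
  induction l with
  | nil =>
    intro fuel acc _
    cases fuel <;> simp [PySem.Chars.replace.go]
  | cons c t ih =>
    intro fuel acc hf
    cases fuel with
    | zero => simp at hf
    | succ f =>
      rw [PySem.Chars.replace.go]
      by_cases h : c = v
      · subst h
        simp only [List.isPrefixOf, beq_self_eq_true, Bool.true_and, if_true]
        rw [show List.drop [c].length (c :: t) = t by simp,
            ih f ([w].reverse ++ acc) (by simpa using hf)]
        simp
      · have hp : ([v].isPrefixOf (c :: t)) = false := by
          simp [List.isPrefixOf]; exact fun e => h e.symm
        rw [hp]
        simp only [Bool.false_eq_true, if_false]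
        rw [ih f (c :: acc) (by simpa using hf)]
        simp [h]

theorem pv_replace_sub (v : Char) (s : List Char) :
    PySem.Chars.replace s [v] [Char.ofNat (v.toNat + 1)] = s.map (pvSub v) := by
  rw [PySem.Chars.replace]
  simp [pv_go_single v (Char.ofNat (v.toNat + 1)) s s.length [] le_rfl]
  exact fun a _ => rfl

-- per-character: the ten staged substitutions compose to A's per-character function
theorem pv_chain (c : Char) :
    pvSub 'U' (pvSub 'O' (pvSub 'I' (pvSub 'E' (pvSub 'A'
      (pvSub 'u' (pvSub 'o' (pvSub 'i' (pvSub 'e' (pvSub 'a' c)))))))))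
      = (if c ∈ pvVowels then Char.ofNat (c.toNat + 1) else c) := by
  by_cases h : c ∈ pvVowels
  · fin_cases h <;> decide
  · simp only [pvVowels, List.mem_cons, List.not_mem_nil, or_false] at h
    push_neg at h
    obtain ⟨h1, h2, h3, h4, h5, h6, h7, h8, h9, h10⟩ := h
    simp [pvSub, h1, h2, h3, h4, h5, h6, h7, h8, h9, h10,
      show c ∉ pvVowels by simp [pvVowels]; exact ⟨h1, h2, h3, h4, h5, h6, h7, h8, h9, h10⟩]

-- at list level: the ten staged map passes equal A's single map
theorem pv_chain_list (l : List Char) :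
    List.map (pvSub 'U') (List.map (pvSub 'O') (List.map (pvSub 'I')
      (List.map (pvSub 'E') (List.map (pvSub 'A') (List.map (pvSub 'u')
        (List.map (pvSub 'o') (List.map (pvSub 'i') (List.map (pvSub 'e')
          (List.map (pvSub 'a') l)))))))))
      = l.map (fun c => if c ∈ pvVowels then Char.ofNat (c.toNat + 1) else c) := by
  induction l with
  | nil => rfl
  | cons c t ih =>
    simp only [List.map_cons]
    rw [ih, pv_chain c]

-- A's loop builds the same character-wise map
theorem pv_foldl_map (l : List Char) (acc : List Char) :
    l.foldl (fun acc letter =>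
      if letter ∈ pvVowels then acc ++ [Char.ofNat (letter.toNat + 1)]
      else acc ++ [letter]) acc
      = acc ++ l.map (fun c => if c ∈ pvVowels then Char.ofNat (c.toNat + 1) else c) := by
  induction l generalizing acc with
  | nil => simp
  | cons c t ih =>
    simp only [List.foldl, List.map]
    by_cases h : c ∈ pvVowels <;> simp [h, ih]

theorem pv_alt_toList (word : String) :
    (next_letter_alt word).toList
      = word.toList.map (fun c => if c ∈ pvVowels then Char.ofNat (c.toNat + 1) else c) := by
  unfold next_letter_alt
  rw [show "aeiouAEIOU".toList = ['a','e','i','o','u','A','E','I','O','U'] from rfl]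
  simp only [List.foldl]
  simp only [PySem.Str.toList_replace]
  simp only [String.toList_ofList]
  simp only [pv_replace_sub]
  exact pv_chain_list word.toList

-- ===== VERDICT (by name: the statement is the Claim_ definition above) =====
theorem next_letter_spec : Claim_equal_next_letter := by
  intro word _
  unfold Spec_next_letter next_letter
  apply String.toList_inj.mp
  rw [String.toList_ofList, pv_foldl_map, List.nil_append, pv_alt_toList]
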